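-- pv_equiv track=rewrite | github.com/Mango-Juice/Algo-Study | COS_PRO/5차/05_몬스터_잡기.py | solution
-- ===== SOURCE A (Python) =====
-- def solution(enemies, armies):
-- 	answer = 0
--
-- 	for i in sorted(enemies):
-- 		for j in sorted(armies):
-- 			if i <= j:
-- 				answer += 1
-- 				break
--
-- 	return answer
-- ===== SOURCE B (Python) =====
-- def solution(enemies, armies):
--     if not armies:
--         return 0
--     m = max(armies)
--     return sum(1 for e in enemies if e <= m)
-- ===== Notes on version B (the rewrite author's own statement) =====
-- stated objective: faster
-- what changed: B replaces the nested loop (re-sorting armies and scanning it for every enemy) by one max(armies) computation and a single counting pass over enemies, since an enemy is beatable iff it is <= the strongest army.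
import Mathlib
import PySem

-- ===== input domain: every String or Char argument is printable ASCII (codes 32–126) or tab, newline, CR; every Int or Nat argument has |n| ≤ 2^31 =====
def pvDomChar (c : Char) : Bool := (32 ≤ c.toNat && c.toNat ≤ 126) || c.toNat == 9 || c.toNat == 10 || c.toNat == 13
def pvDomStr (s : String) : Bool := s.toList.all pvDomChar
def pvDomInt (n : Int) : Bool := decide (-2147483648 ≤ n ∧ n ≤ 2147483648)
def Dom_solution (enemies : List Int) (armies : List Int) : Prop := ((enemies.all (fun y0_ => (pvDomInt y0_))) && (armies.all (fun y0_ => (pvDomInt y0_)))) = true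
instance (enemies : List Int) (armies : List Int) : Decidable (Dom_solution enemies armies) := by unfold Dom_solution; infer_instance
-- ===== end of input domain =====

-- B computes max(armies) once and counts enemies ≤ it, replacing A's nested sorted scans (faster, asymptotic).


-- ===== PORT A =====
-- inner 'for j in sorted(armies): if i <= j: answer += 1; break'
def innerA (i : Int) : List Int → Int → Int
  | [], acc => acc
  | j :: js, acc => if i ≤ j then acc + 1 else innerA i js acc

def solution (enemies : List Int) (armies : List Int) : Int :=
  (PySem.List.sorted enemies (fun x => x) false).foldl
    (fun acc i => innerA i (PySem.List.sorted armies (fun x => x) false) acc) 0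

-- ===== PORT B =====
def solution_alt (enemies : List Int) (armies : List Int) : Int :=
  match PySem.List.max? armies (fun x => x) with
  | none => 0
  | some m => (enemies.countP (fun e => e ≤ m) : Int)

-- ===== PRECONDITION & SPEC =====
def Spec_solution (enemies : List Int) (armies : List Int) (out : Int) : Prop := out = solution_alt enemies armies
instance (enemies : List Int) (armies : List Int) (out : Int) : Decidable (Spec_solution enemies armies out) := by unfold Spec_solution; infer_instance

-- ===== CLAIM (what is proved, stated in full; the proofs are below) =====
def Claim_equal_solution : Prop := ∀ (enemies : List Int) (armies : List Int), Dom_solution enemies armies → Spec_solution enemies armies (solution enemies armies)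

-- ===== LEMMAS AND PROOFS =====

-- the inner loop adds 1 iff some army beats i
theorem innerA_eq (i : Int) (js : List Int) (acc : Int) :
    innerA i js acc = if js.any (fun j => i ≤ j) then acc + 1 else acc := by
  induction js with
  | nil => simp [innerA]
  | cons j js ih =>
    by_cases h : i ≤ j <;> simp [innerA, h, ih]

theorem foldl_innerA (L : List Int) (js : List Int) (acc : Int) :
    L.foldl (fun acc i => innerA i js acc) acc
      = acc + (L.countP (fun i => js.any (fun j => i ≤ j)) : Int) := by
  induction L generalizing acc with
  | nil => simp
  | cons x L ih =>
    rw [List.foldl_cons, innerA_eq, List.countP_cons, ih]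
    by_cases h : js.any (fun j => x ≤ j) = true
    · simp [h]; ring
    · simp [h]

-- some army beats i iff i ≤ max(armies)
theorem any_iff_max (i : Int) (armies : List Int) :
    armies.any (fun j => i ≤ j)
      = match PySem.List.max? armies (fun x => x) with
        | none => false
        | some m => decide (i ≤ m) := by
  cases hm : PySem.List.max? armies (fun x => x) with
  | none =>
    have : armies = [] := (PySem.List.max?_eq_none_iff armies (fun x => x)).mp hm
    simp [this]
  | some m =>
    have hmem : m ∈ armies := PySem.List.max?_mem hm
    have hmax : ∀ y ∈ armies, y ≤ m := fun y hy => by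
      simpa using PySem.List.max?_isMax hm y hy
    by_cases h : i ≤ m
    · simp only [h, decide_true, List.any_eq_true, decide_eq_true_eq]
      exact ⟨m, hmem, h⟩
    · simp only [h, decide_false, List.any_eq_false, decide_eq_true_eq]
      intro j hj hij
      exact h (le_trans hij (hmax j hj))

-- any over the sorted list equals any over the original
theorem any_sorted (i : Int) (armies : List Int) :
    (PySem.List.sorted armies (fun x => x) false).any (fun j => i ≤ j)
      = armies.any (fun j => i ≤ j) := by
  cases hb : armies.any (fun j => i ≤ j) with
  | true =>
    rw [List.any_eq_true] at hb ⊢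
    obtain ⟨j, hj, hij⟩ := hb
    exact ⟨j, by rw [PySem.List.mem_sorted]; exact hj, hij⟩
  | false =>
    rw [List.any_eq_false] at hb ⊢
    intro j hj
    exact hb j (by rwa [PySem.List.mem_sorted] at hj)

-- ===== VERDICT (by name: the statement is the Claim_ definition above) =====
theorem solution_spec : Claim_equal_solution := by
  intro enemies armies _
  unfold Spec_solution solution solution_alt
  rw [foldl_innerA]
  rw [(PySem.List.sorted_perm enemies (fun x => x) false).countP_eq]
  have hp : (fun i : Int => (PySem.List.sorted armies (fun x => x) false).any (fun j => i ≤ j))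
      = fun i : Int => match PySem.List.max? armies (fun x => x) with
                       | none => false
                       | some m => decide (i ≤ m) := by
    funext i
    rw [any_sorted, any_iff_max]
  rw [hp]
  cases hm : PySem.List.max? armies (fun x => x) with
  | none => simp
  | some m => simp
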